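-- pv_equiv track=rewrite | github.com/mortyc126-debug/SHA | step11_carry_segments.py | gpk_segments
-- ===== SOURCE A (Python) =====
-- def gpk_segments(gpk):
--     """Break GPK string into segments of consecutive same type."""
--     if not gpk:
--         return []
--     segments = []
--     current = gpk[0]
--     length = 1
--     start = 0
--     for k in range(1, len(gpk)):
--         if gpk[k] == current:
--             length += 1
--         else:
--             segments.append((current, start, length))
--             current = gpk[k]
--             length = 1
--             start = k
--     segments.append((current, start, length))
--     return segments
-- ===== SOURCE B (Python) =====
-- def gpk_segments(gpk):
--     """Break GPK string into segments of consecutive same type."""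
--     n = len(gpk)
--     bounds = [k for k in range(n) if k == 0 or gpk[k] != gpk[k - 1]] + [n]
--     return [(gpk[a], a, b - a) for a, b in zip(bounds, bounds[1:])]
-- ===== Notes on version B (the rewrite author's own statement) =====
-- stated objective: alternative
-- what changed: Replaces A's single stateful scan (current char / length / start accumulators plus a trailing append) with two staged passes: first compute the list of boundary indices where the character changes (plus the end index), then build the segments by pairing each boundary with the next.
import Mathlib
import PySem

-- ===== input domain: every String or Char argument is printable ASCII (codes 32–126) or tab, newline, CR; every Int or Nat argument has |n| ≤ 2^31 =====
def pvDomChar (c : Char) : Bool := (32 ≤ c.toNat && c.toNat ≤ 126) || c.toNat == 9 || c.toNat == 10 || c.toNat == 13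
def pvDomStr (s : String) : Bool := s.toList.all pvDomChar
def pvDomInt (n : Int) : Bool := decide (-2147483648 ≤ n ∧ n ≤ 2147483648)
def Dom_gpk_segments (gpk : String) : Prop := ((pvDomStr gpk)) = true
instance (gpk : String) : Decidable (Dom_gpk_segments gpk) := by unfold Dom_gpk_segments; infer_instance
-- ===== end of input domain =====

-- B replaces A's single stateful scan (current/length/start accumulators, trailing append)
-- by two staged passes: first the list of boundary indices where the character changes
-- (plus the end index), then segments formed by pairing consecutive boundaries; same O(n)
-- cost, return values proved equal on all inputs.

-- ===== PORT A =====
-- state = (segments, current, length, start), exactly A's loop variables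
def gpk_segments (gpk : String) : List (String × Int × Int) :=
  match gpk.toList with
  | [] => []
  | c :: _ =>
    let fin := (PySem.List.pyRange 1 (gpk.toList.length : Int) 1).foldl
      (fun (st : List (String × Int × Int) × Char × Int × Int) k =>
        match PySem.Str.pyGet? gpk k with
        | some ch =>
          if ch == st.2.1 then (st.1, st.2.1, st.2.2.1 + 1, st.2.2.2)
          else (st.1 ++ [(String.singleton st.2.1, st.2.2.2, st.2.2.1)], ch, 1, k)
        | none => st)   -- unreachable: k is always in range
      (([] : List (String × Int × Int)), c, (1 : Int), (0 : Int))
    fin.1 ++ [(String.singleton fin.2.1, fin.2.2.2, fin.2.2.1)]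

-- ===== PORT B =====
-- '[k for k in range(n) if k == 0 or gpk[k] != gpk[k-1]] + [n]'; indices are Nat since
-- k ranges over range(n) (and Python's short-circuit 'or' makes k-1 only reachable for k ≥ 1)
def pvBoundsB (cs : List Char) : List Nat :=
  ((List.range cs.length).filter (fun k => k == 0 || cs[k]? != cs[k - 1]?)) ++ [cs.length]

-- '[(gpk[a], a, b - a) for a, b in zip(bounds, bounds[1:])]'; gpk[a] is always in range
-- (a is a non-final boundary), so getD's default is never used
def gpk_segments_alt (gpk : String) : List (String × Int × Int) :=
  let cs := gpk.toList
  let bounds := pvBoundsB cs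
  (bounds.zip bounds.tail).map
    (fun p => (String.singleton (cs.getD p.1 'a'), (p.1 : Int), (p.2 : Int) - (p.1 : Int)))

-- ===== PRECONDITION & SPEC =====
def Spec_gpk_segments (gpk : String) (out : List (String × Int × Int)) : Prop := out = gpk_segments_alt gpk
instance (gpk : String) (out : List (String × Int × Int)) : Decidable (Spec_gpk_segments gpk out) := by unfold Spec_gpk_segments; infer_instance

-- ===== CLAIM (what is proved, stated in full; the proofs are below) =====
def Claim_equal_gpk_segments : Prop := ∀ (gpk : String), Dom_gpk_segments gpk → Spec_gpk_segments gpk (gpk_segments gpk)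

-- ===== LEMMAS AND PROOFS =====

-- canonical run-length decomposition both ports are reduced to
def pvRle : List Char → Int → List (String × Int × Int)
  | [], _ => []
  | c :: cs, s =>
    (String.singleton c, s, 1 + ((cs.takeWhile (· == c)).length : Int)) ::
      pvRle (cs.dropWhile (· == c)) (s + 1 + ((cs.takeWhile (· == c)).length : Int))
termination_by l _ => l.length
decreasing_by
  have := List.length_dropWhile_le (· == c) cs
  simp only [List.length_cons]; omega

theorem pv_dropWhile_eq_drop (p : Char → Bool) (l : List Char) :
    l.dropWhile p = l.drop (l.takeWhile p).length := by
  induction l with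
  | nil => simp
  | cons x xs ih =>
    by_cases h : p x
    · simp [h, ih]
    · simp [h]

-- ---- A-side: the fold equals pvRle ----

-- A's per-character continuation, starting from state (current c, length len, start st) at index k
def pvEmitFrom : List Char → Char → Int → Int → Int → List (String × Int × Int)
  | [], c, len, st, _ => [(String.singleton c, st, len)]
  | d :: rest, c, len, st, k =>
    if d == c then pvEmitFrom rest c (len + 1) st (k + 1)
    else (String.singleton c, st, len) :: pvEmitFrom rest d 1 k (k + 1)

theorem pvEmitFrom_eq_rle (rest : List Char) : ∀ (c : Char) (len st : Int),
    pvEmitFrom rest c len st (st + len) =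
      (String.singleton c, st, len + ((rest.takeWhile (· == c)).length : Int)) ::
        pvRle (rest.dropWhile (· == c)) (st + len + ((rest.takeWhile (· == c)).length : Int)) := by
  induction rest with
  | nil => intro c len st; simp [pvEmitFrom, pvRle]
  | cons d rest ih =>
    intro c len st
    rw [pvEmitFrom]
    by_cases h : (d == c) = true
    · rw [if_pos h, show st + len + 1 = st + (len + 1) by ring, ih c (len + 1) st,
          List.takeWhile_cons, List.dropWhile_cons, if_pos h, if_pos h]
      simp only [List.length_cons, List.cons.injEq, Prod.mk.injEq]
      refine ⟨⟨trivial, trivial, by push_cast; ring⟩, ?_⟩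
      congr 1
      push_cast; ring
    · rw [if_neg h, List.takeWhile_cons, List.dropWhile_cons, if_neg h, if_neg h]
      simp only [List.length_nil, Nat.cast_zero, add_zero]
      congr 1
      rw [ih d 1 (st + len), pvRle]

-- A's loop body and final append, named so the fold lemma can be stated
def pvStepA (gpk : String) (stt : List (String × Int × Int) × Char × Int × Int) (j : Int) :
    List (String × Int × Int) × Char × Int × Int :=
  match PySem.Str.pyGet? gpk j with
  | some ch =>
    if ch == stt.2.1 then (stt.1, stt.2.1, stt.2.2.1 + 1, stt.2.2.2)
    else (stt.1 ++ [(String.singleton stt.2.1, stt.2.2.2, stt.2.2.1)], ch, 1, j)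
  | none => stt

def pvFinA (fin : List (String × Int × Int) × Char × Int × Int) : List (String × Int × Int) :=
  fin.1 ++ [(String.singleton fin.2.1, fin.2.2.2, fin.2.2.1)]

theorem gpk_segments_eq (gpk : String) :
    gpk_segments gpk =
      match gpk.toList with
      | [] => []
      | c :: _ =>
        pvFinA ((PySem.List.pyRange 1 (gpk.toList.length : Int) 1).foldl (pvStepA gpk)
          ([], c, 1, 0)) := rfl

-- A's fold over range(1, n) equals pvEmitFrom on the remaining characters
theorem pv_fold_eq_emitFrom (gpk : String) (k : Nat)
    (segs : List (String × Int × Int)) (c : Char) (len st : Int) :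
    pvFinA ((PySem.List.pyRange (k : Int) (gpk.toList.length : Int) 1).foldl (pvStepA gpk)
        (segs, c, len, st)) =
      segs ++ pvEmitFrom (gpk.toList.drop k) c len st (k : Int) := by
  by_cases h : k < gpk.toList.length
  · rw [PySem.List.pyRange_one_cons (by exact_mod_cast h)]
    have hg : PySem.Str.pyGet? gpk (k : Int) = some (gpk.toList[k]) := by
      simp [List.getElem?_eq_getElem h]
    rw [← List.getElem_cons_drop h, pvEmitFrom, List.foldl_cons]
    by_cases hc : (gpk.toList[k] == c) = true
    · rw [if_pos hc]
      have hstep : pvStepA gpk (segs, c, len, st) (k : Int) = (segs, c, len + 1, st) := by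
        simp [pvStepA, List.getElem?_eq_getElem h, eq_of_beq hc]
      rw [hstep]
      have := pv_fold_eq_emitFrom gpk (k + 1) segs c (len + 1) st
      push_cast at this ⊢
      exact this
    · rw [if_neg hc]
      have hstep : pvStepA gpk (segs, c, len, st) (k : Int) =
          (segs ++ [(String.singleton c, st, len)], gpk.toList[k], 1, (k : Int)) := by
        have hne : ¬gpk.toList[k] = c := by simpa using hc
        simp [pvStepA, List.getElem?_eq_getElem h, hne]
      rw [hstep]
      have := pv_fold_eq_emitFrom gpk (k + 1)
        (segs ++ [(String.singleton c, st, len)]) gpk.toList[k] 1 (k : Int)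
      push_cast at this ⊢
      rw [this, List.append_assoc, List.singleton_append]
  · rw [PySem.List.pyRange_one_eq_nil (by exact_mod_cast Nat.le_of_not_lt h),
        List.drop_eq_nil_of_le (by omega)]
    simp [pvEmitFrom, pvFinA]
termination_by gpk.toList.length - k
decreasing_by all_goals omega

theorem gpk_segments_eq_rle (gpk : String) : gpk_segments gpk = pvRle gpk.toList 0 := by
  rw [gpk_segments_eq]
  split
  · rename_i heq; rw [heq, pvRle]
  · rename_i c rest heq
    have hf := pv_fold_eq_emitFrom gpk 1 [] c 1 0
    push_cast at hf
    rw [hf, heq, List.drop_succ_cons, List.drop_zero, List.nil_append]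
    have he := pvEmitFrom_eq_rle rest c 1 0
    norm_num at he
    rw [he, pvRle]
    norm_num

-- ---- B-side: the boundary list equals pvRle ----

-- filtering a range, peeling index 0
theorem pv_filter_succ_pos (P : Nat → Bool) (n : Nat) (h : P 0 = true) :
    List.filter P (List.range (n + 1)) = 0 :: (List.filter (fun k => P (k + 1)) (List.range n)).map (· + 1) := by
  rw [List.range_succ_eq_map, List.filter_cons_of_pos h, List.filter_map]
  simp [Function.comp_def]

theorem pv_filter_succ_neg (P : Nat → Bool) (n : Nat) (h : P 0 = false) :
    List.filter P (List.range (n + 1)) = (List.filter (fun k => P (k + 1)) (List.range n)).map (· + 1) := by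
  rw [List.range_succ_eq_map, List.filter_cons_of_neg (by simp [h]), List.filter_map]
  simp [Function.comp_def]

-- prepending a repeated character: boundary 0 of the old list disappears, all shift by one
theorem pvBoundsB_cons_eq (c : Char) (cs2 : List Char) :
    pvBoundsB (c :: c :: cs2) = 0 :: ((pvBoundsB (c :: cs2)).tail).map (· + 1) := by
  unfold pvBoundsB
  simp only [List.length_cons]
  rw [pv_filter_succ_pos (fun k => k == 0 || (c :: c :: cs2)[k]? != (c :: c :: cs2)[k - 1]?)
        (cs2.length + 1) (by simp),
      pv_filter_succ_neg (fun k => k + 1 == 0 || (c :: c :: cs2)[k + 1]? != (c :: c :: cs2)[k + 1 - 1]?)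
        cs2.length (by simp),
      pv_filter_succ_pos (fun k => k == 0 || (c :: cs2)[k]? != (c :: cs2)[k - 1]?)
        cs2.length (by simp)]
  simp only [List.tail_cons, List.cons_append, List.map_append, List.map_map, List.map_cons,
    List.map_nil, List.cons.injEq, true_and]
  congr 2

-- prepending a different character: all old boundaries survive, shifted by one
theorem pvBoundsB_cons_ne (c c' : Char) (cs2 : List Char) (h : ¬ c' = c) :
    pvBoundsB (c :: c' :: cs2) = 0 :: (pvBoundsB (c' :: cs2)).map (· + 1) := by
  unfold pvBoundsB
  simp only [List.length_cons]
  rw [pv_filter_succ_pos (fun k => k == 0 || (c :: c' :: cs2)[k]? != (c :: c' :: cs2)[k - 1]?)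
        (cs2.length + 1) (by simp)]
  simp only [List.cons_append, List.map_append, List.map_cons, List.map_nil, List.cons.injEq,
    true_and]
  congr 2
  apply List.filter_congr
  intro k _
  cases k with
  | zero => simp [h]
  | succ j => simp [List.getElem?_cons_succ]

-- run-decomposition of the boundary list
theorem pvBoundsB_run (c : Char) (cs : List Char) :
    pvBoundsB (c :: cs) =
      0 :: (pvBoundsB (cs.dropWhile (· == c))).map (· + (1 + (cs.takeWhile (· == c)).length)) := by
  induction cs with
  | nil => simp [pvBoundsB]
  | cons c' cs2 ih =>
    by_cases h : c' = c
    · subst h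
      rw [pvBoundsB_cons_eq, ih,
        List.takeWhile_cons_of_pos (by simp), List.dropWhile_cons_of_pos (by simp)]
      simp only [List.tail_cons, List.map_map, List.length_cons]
      congr 1
    · rw [pvBoundsB_cons_ne c c' cs2 h,
        List.takeWhile_cons_of_neg (by simp [h]), List.dropWhile_cons_of_neg (by simp [h])]
      simp

-- the boundary list always starts with 0
theorem pvBoundsB_head (cs : List Char) : ∃ t, pvBoundsB cs = 0 :: t := by
  cases cs with
  | nil => exact ⟨[], rfl⟩
  | cons c cs' => exact ⟨_, pvBoundsB_run c cs'⟩

-- start offsets of pvRle shift uniformly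
theorem pvRle_shift (cs : List Char) (s t : Int) :
    pvRle cs (s + t) = (pvRle cs t).map (fun x => (x.1, x.2.1 + s, x.2.2)) := by
  match cs with
  | [] => rw [pvRle, pvRle]; rfl
  | c :: cs' =>
    rw [pvRle, pvRle]
    simp only [List.map_cons, List.cons.injEq, Prod.mk.injEq]
    refine ⟨⟨trivial, by ring, trivial⟩, ?_⟩
    rw [show s + t + 1 + ((cs'.takeWhile (· == c)).length : Int)
          = s + (t + 1 + ((cs'.takeWhile (· == c)).length : Int)) by ring]
    exact pvRle_shift _ s _
termination_by cs.length
decreasing_by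
  have := List.length_dropWhile_le (· == c) cs'
  simp only [List.length_cons]; omega

-- zipping a mapped list with its tail
theorem pv_zip_tail_map (f : Nat → Nat) (l : List Nat) :
    ((l.map f).zip (l.map f).tail) = (l.zip l.tail).map (Prod.map f f) := by
  rw [← List.map_tail, List.zip_map]

theorem pvSegsB_eq_rle (cs : List Char) :
    ((pvBoundsB cs).zip (pvBoundsB cs).tail).map
      (fun p => (String.singleton (cs.getD p.1 'a'), (p.1 : Int), (p.2 : Int) - (p.1 : Int)))
      = pvRle cs 0 := by
  match cs with
  | [] => rw [pvRle]; rfl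
  | c :: cs' =>
    obtain ⟨bt, hbt⟩ := pvBoundsB_head (cs'.dropWhile (· == c))
    rw [pvBoundsB_run, pvRle, show (0 : Int) + 1 + ((cs'.takeWhile (· == c)).length : Int)
          = ((1 + (cs'.takeWhile (· == c)).length : Nat) : Int) + 0 by push_cast; ring,
        pvRle_shift, ← pvSegsB_eq_rle (cs'.dropWhile (· == c)), hbt]
    simp only [List.tail_cons, List.map_cons, List.zip_cons_cons, List.map_map]
    congr 1
    · simp
    · have hz : ((0 + (1 + (cs'.takeWhile (· == c)).length)) ::
            bt.map (· + (1 + (cs'.takeWhile (· == c)).length)))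
          = (((0 : Nat) :: bt).map (· + (1 + (cs'.takeWhile (· == c)).length))) := by simp
      rw [hz, show bt.map (· + (1 + (cs'.takeWhile (· == c)).length))
            = (((0 : Nat) :: bt).map (· + (1 + (cs'.takeWhile (· == c)).length))).tail by simp,
          pv_zip_tail_map]
      try simp only [List.tail_cons]
      try simp only [List.map_map]
      congr 1
      funext p
      obtain ⟨a, b⟩ := p
      simp only [Function.comp_apply, Prod.map_apply, Prod.mk.injEq]
      have hdrop : (c :: cs').drop (1 + (cs'.takeWhile (· == c)).length)
          = cs'.dropWhile (· == c) := by
        rw [show 1 + (cs'.takeWhile (· == c)).length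
              = (cs'.takeWhile (· == c)).length + 1 from Nat.add_comm _ _,
            List.drop_succ_cons, ← pv_dropWhile_eq_drop]
      refine ⟨?_, by push_cast; ring, by push_cast; ring⟩
      rw [List.getD, List.getD,
          show a + (1 + (cs'.takeWhile (· == c)).length)
            = (1 + (cs'.takeWhile (· == c)).length) + a by omega,
          ← List.getElem?_drop, hdrop]
termination_by cs.length
decreasing_by
  have := List.length_dropWhile_le (· == c) cs'
  simp only [List.length_cons]; omega

-- ===== VERDICT (by name: the statement is the Claim_ definition above) =====
theorem gpk_segments_spec : Claim_equal_gpk_segments := by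
  intro gpk _
  show gpk_segments gpk = gpk_segments_alt gpk
  rw [gpk_segments_eq_rle, gpk_segments_alt, ← pvSegsB_eq_rle]
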